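-- pv_equiv track=rewrite | github.com/Bharadwaja92/CompetitiveCoding | CodeSignal/CompanyChallenges/PureStorage/LongestUncorruptedSegment.py | longestUncorruptedSegment
-- ===== SOURCE A (Python) =====
-- def longestUncorruptedSegment(sourceArray, destinationArray):
--     sn = -1   # len(sourceArray)-1
--     ln, mn = 0, 0
--     for i in range(len(sourceArray)):
--         if sourceArray[i] == destinationArray[i]:
--             ln += 1
--         else:
--             ln = 0
--             sn = i
--         if mn < ln:
--             mn = ln
--     return mn, sn
-- ===== SOURCE B (Python) =====
-- def longestUncorruptedSegment(sourceArray, destinationArray):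
--     n = len(sourceArray)
--     mism = [i for i in range(n) if sourceArray[i] != destinationArray[i]]
--     sn = mism[-1] if mism else -1
--     mn, prev = 0, -1
--     for m in mism + [n]:
--         if m - prev - 1 > mn:
--             mn = m - prev - 1
--         prev = m
--     return mn, sn
-- ===== Notes on version B (the rewrite author's own statement) =====
-- stated objective: alternative
-- what changed: Instead of A's single scan carrying a running run-length and running maximum, B first collects the list of mismatch indices, takes sn as its last element (-1 if none), and computes mn as the largest gap between consecutive mismatch positions bracketed by -1 and len(sourceArray).
import Mathlib
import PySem

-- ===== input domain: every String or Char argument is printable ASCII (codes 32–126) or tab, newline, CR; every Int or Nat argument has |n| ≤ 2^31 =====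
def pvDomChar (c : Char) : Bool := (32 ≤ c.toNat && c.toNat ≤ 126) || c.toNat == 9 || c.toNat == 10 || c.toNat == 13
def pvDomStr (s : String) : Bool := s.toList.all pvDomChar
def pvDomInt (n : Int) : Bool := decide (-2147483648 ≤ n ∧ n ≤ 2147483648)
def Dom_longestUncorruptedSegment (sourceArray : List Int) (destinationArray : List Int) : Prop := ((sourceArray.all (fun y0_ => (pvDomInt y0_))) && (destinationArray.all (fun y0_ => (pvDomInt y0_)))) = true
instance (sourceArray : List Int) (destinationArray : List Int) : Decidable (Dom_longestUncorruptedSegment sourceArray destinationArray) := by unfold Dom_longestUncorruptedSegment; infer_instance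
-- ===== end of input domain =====

-- B replaces A's single scan (running run length + running max) by a different decomposition:
-- collect the mismatch indices, take sn as the last one, and get mn as the largest gap between
-- consecutive mismatch positions bracketed by -1 and len(sourceArray). Objective: alternative.

-- ===== PORT A =====
-- loop body of A's for-loop (state = (sn, ln, mn))
def pvStepA (sourceArray destinationArray : List Int) (st : Int × Int × Int) (i : Int) : Int × Int × Int :=
  let st1 :=
    if (PySem.List.pyGet? sourceArray i).getD 0 = (PySem.List.pyGet? destinationArray i).getD 0
    then (st.1, st.2.1 + 1, st.2.2)
    else (i, 0, st.2.2)
  if st1.2.2 < st1.2.1 then (st1.1, st1.2.1, st1.2.1) else st1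

def longestUncorruptedSegment (sourceArray : List Int) (destinationArray : List Int) : Int × Int :=
  let st := (PySem.List.pyRange 0 sourceArray.length 1).foldl (pvStepA sourceArray destinationArray) (-1, 0, 0)
  (st.2.2, st.1)

-- ===== PORT B =====
-- the comparison 'sourceArray[i] != destinationArray[i]' of B's comprehension
def pvMismatch (sourceArray destinationArray : List Int) (i : Int) : Bool :=
  decide (¬ (PySem.List.pyGet? sourceArray i).getD 0 = (PySem.List.pyGet? destinationArray i).getD 0)

-- loop body of B's gap loop (state = (mn, prev))
def pvStepB (st : Int × Int) (m : Int) : Int × Int :=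
  (if m - st.2 - 1 > st.1 then m - st.2 - 1 else st.1, m)

def longestUncorruptedSegment_alt (sourceArray : List Int) (destinationArray : List Int) : Int × Int :=
  let n : Int := sourceArray.length
  let mism := (PySem.List.pyRange 0 sourceArray.length 1).filter (pvMismatch sourceArray destinationArray)
  let sn : Int := if mism ≠ [] then (PySem.List.pyGet? mism (-1)).getD 0 else -1
  let st := (mism ++ [n]).foldl pvStepB (0, -1)
  (st.1, sn)

-- ===== PRECONDITION & SPEC =====
-- Pre_ excludes exactly the inputs where Python A raises IndexError:
-- destinationArray shorter than sourceArray (B raises there too).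
def Pre_longestUncorruptedSegment (sourceArray : List Int) (destinationArray : List Int) : Prop :=
  sourceArray.length ≤ destinationArray.length
instance (sourceArray : List Int) (destinationArray : List Int) : Decidable (Pre_longestUncorruptedSegment sourceArray destinationArray) := by unfold Pre_longestUncorruptedSegment; infer_instance
def pvWitness_longestUncorruptedSegment : List Int × List Int := ([1, 2, 3], [1, 5, 3])

def Spec_longestUncorruptedSegment (sourceArray : List Int) (destinationArray : List Int) (out : Int × Int) : Prop := out = longestUncorruptedSegment_alt sourceArray destinationArray
instance (sourceArray : List Int) (destinationArray : List Int) (out : Int × Int) : Decidable (Spec_longestUncorruptedSegment sourceArray destinationArray out) := by unfold Spec_longestUncorruptedSegment; infer_instance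

-- ===== CLAIM (what is proved, stated in full; the proofs are below) =====
def Claim_equal_longestUncorruptedSegment : Prop := ∀ (sourceArray : List Int) (destinationArray : List Int), Dom_longestUncorruptedSegment sourceArray destinationArray → Pre_longestUncorruptedSegment sourceArray destinationArray → Spec_longestUncorruptedSegment sourceArray destinationArray (longestUncorruptedSegment sourceArray destinationArray)

-- ===== LEMMAS AND PROOFS =====

-- the second component of B's gap fold is the last element processed
lemma pvStepB_snd (L : List Int) (st : Int × Int) :
    (L.foldl pvStepB st).2 = L.getLastD st.2 := by
  induction L generalizing st with
  | nil => rfl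
  | cons m L ih =>
    rw [List.foldl_cons, ih, List.getLastD_cons]
    simp [pvStepB]

-- invariant: after k steps of A's loop, A's state (sn, ln, mn) is determined by B's gap fold
-- over the mismatch indices in [0, k)
lemma pvInv (s d : List Int) (k : Nat) :
    ((PySem.List.pyRange 0 (k : Int) 1).foldl (pvStepA s d) (-1, 0, 0)
      = (((((PySem.List.pyRange 0 (k : Int) 1).filter (pvMismatch s d)).foldl pvStepB (0, -1)).2),
         ((k : Int) - (((PySem.List.pyRange 0 (k : Int) 1).filter (pvMismatch s d)).foldl pvStepB (0, -1)).2 - 1),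
         (max ((((PySem.List.pyRange 0 (k : Int) 1).filter (pvMismatch s d)).foldl pvStepB (0, -1)).1)
              ((k : Int) - (((PySem.List.pyRange 0 (k : Int) 1).filter (pvMismatch s d)).foldl pvStepB (0, -1)).2 - 1))))
    ∧ 0 ≤ (((PySem.List.pyRange 0 (k : Int) 1).filter (pvMismatch s d)).foldl pvStepB (0, -1)).1
    ∧ -1 ≤ (((PySem.List.pyRange 0 (k : Int) 1).filter (pvMismatch s d)).foldl pvStepB (0, -1)).2
    ∧ (((PySem.List.pyRange 0 (k : Int) 1).filter (pvMismatch s d)).foldl pvStepB (0, -1)).2 < (k : Int) := by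
  induction k with
  | zero => simp [PySem.List.pyRange_one_eq_nil]
  | succ k ih =>
    obtain ⟨h1, h2, h3, h4⟩ := ih
    have hr : PySem.List.pyRange 0 ((k + 1 : Nat) : Int) 1
        = PySem.List.pyRange 0 (k : Int) 1 ++ [(k : Int)] := by
      push_cast
      exact PySem.List.pyRange_one_succ_right (by positivity)
    rw [hr]
    simp only [List.filter_append, List.foldl_append, h1]
    by_cases hc : (PySem.List.pyGet? s (k : Int)).getD 0 = (PySem.List.pyGet? d (k : Int)).getD 0
    · have hf : pvMismatch s d (k : Int) = false := by
        simp only [pvMismatch, decide_eq_false_iff_not, not_not]; exact hc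
      simp only [List.filter_cons, List.filter_nil, hf, Bool.false_eq_true, if_false,
        List.foldl_cons, List.foldl_nil, pvStepA, if_pos hc]
      refine ⟨?_, h2, h3, by omega⟩
      split_ifs <;> simp only [Prod.mk.injEq] <;> exact ⟨by trivial, by omega, by omega⟩
    · have hf : pvMismatch s d (k : Int) = true := by
        simp only [pvMismatch, decide_eq_true_eq]; exact hc
      simp only [List.filter_cons, List.filter_nil, hf, if_true, List.foldl_cons,
        List.foldl_nil, pvStepA, pvStepB, if_neg hc]
      refine ⟨?_, ?_, by omega, by omega⟩
      · split_ifs <;> simp only [Prod.mk.injEq] <;> exact ⟨by trivial, by omega, by omega⟩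
      · split_ifs <;> omega

-- ===== VERDICT (by name: the statement is the Claim_ definition above) =====
theorem longestUncorruptedSegment_spec : Claim_equal_longestUncorruptedSegment := by
  intro s d _ _
  unfold Spec_longestUncorruptedSegment
  obtain ⟨h1, h2, h3, h4⟩ := pvInv s d s.length
  simp only [longestUncorruptedSegment, longestUncorruptedSegment_alt, h1,
    List.foldl_append, List.foldl_cons, List.foldl_nil]
  rw [Prod.mk.injEq]
  constructor
  · simp only [pvStepB]
    split_ifs <;> omega
  · rw [pvStepB_snd]
    rcases hL : ((PySem.List.pyRange 0 (s.length : Int) 1).filter (pvMismatch s d)).getLast? with _ | x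
    · simp [List.getLast?_eq_none_iff.mp hL]
    · have hne : ((PySem.List.pyRange 0 (s.length : Int) 1).filter (pvMismatch s d)) ≠ [] := by
        intro h; rw [h] at hL; simp at hL
      simp [hne, PySem.List.pyGet?_neg_one, hL, List.getLastD_eq_getLast?]
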